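-- pv_equiv track=rewrite | github.com/anchitgupt/Hyper-Clique-Pattern-Mining | ANCHIT_GUPTA_MT19060_A3.py | getCrossSupportIndex2
-- ===== SOURCE A (Python) =====
-- def getCrossSupportIndex2(ilist, hconfi):
--     b = []
--     fi = []
--     i=0
--     for i in range(len(ilist)-1):
--         b = []
--         for j in range(i+1,len(ilist)):
--             if ilist[i] not in b:
--                     b.append(ilist[i])
--             b.append(ilist[j])
--         fi.append(b)
--     return fi
-- ===== SOURCE B (Python) =====
-- def getCrossSupportIndex2(ilist, hconfi):
--     out = []
--     tail = []
--     for i in reversed(range(1, len(ilist))):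
--         tail = [ilist[i]] + tail
--         out.append([ilist[i - 1]] + tail)
--     out.reverse()
--     return out
-- ===== Notes on version B (the rewrite author's own statement) =====
-- stated objective: alternative
-- what changed: Replaces the nested loops (inner loop re-building each row with a membership test) by a single backward pass that threads an accumulated suffix list, prepending to it and emitting each row from it.
import Mathlib
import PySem

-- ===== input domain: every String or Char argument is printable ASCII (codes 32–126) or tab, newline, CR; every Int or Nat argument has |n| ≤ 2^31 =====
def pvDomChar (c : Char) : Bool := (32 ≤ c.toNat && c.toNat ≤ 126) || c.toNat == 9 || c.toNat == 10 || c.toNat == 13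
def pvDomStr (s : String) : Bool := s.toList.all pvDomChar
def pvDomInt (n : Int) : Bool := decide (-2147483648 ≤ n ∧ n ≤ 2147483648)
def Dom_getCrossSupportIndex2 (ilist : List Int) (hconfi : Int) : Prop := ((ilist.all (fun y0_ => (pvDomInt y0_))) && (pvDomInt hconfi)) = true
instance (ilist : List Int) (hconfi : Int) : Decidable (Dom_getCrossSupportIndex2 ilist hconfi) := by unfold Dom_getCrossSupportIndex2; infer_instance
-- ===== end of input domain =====

-- B replaces A's nested slicing-style loops by one backward pass threading an
-- accumulated suffix list (objective: alternative decomposition, same cost).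

-- ===== PORT A =====
-- literal transliteration of A: outer loop over range(len-1), inner loop over
-- range(i+1, len) rebuilding b with a membership test, fi.append(b)
def getCrossSupportIndex2 (ilist : List Int) (hconfi : Int) : List (List Int) :=
  (PySem.List.pyRange 0 ((ilist.length : Int) - 1) 1).foldl
    (fun fi i =>
      let b := (PySem.List.pyRange (i + 1) (ilist.length : Int) 1).foldl
        (fun b j =>
          let b := if PySem.List.pyGetD ilist i 0 ∈ b then b
                   else b ++ [PySem.List.pyGetD ilist i 0]
          b ++ [PySem.List.pyGetD ilist j 0]) []
      fi ++ [b]) []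

-- ===== PORT B =====
-- literal transliteration of Source B: fold over reversed(range(1, len)) threading
-- (out, tail); tail grows by prepending ilist[i]; out reversed at the end
def getCrossSupportIndex2_alt (ilist : List Int) (hconfi : Int) : List (List Int) :=
  let st := ((PySem.List.pyRange 1 (ilist.length : Int) 1).reverse).foldl
    (fun (st : List (List Int) × List Int) i =>
      let tail := PySem.List.pyGetD ilist i 0 :: st.2
      (st.1 ++ [PySem.List.pyGetD ilist (i - 1) 0 :: tail], tail)) ([], [])
  st.1.reverse

-- ===== PRECONDITION & SPEC =====
def Spec_getCrossSupportIndex2 (ilist : List Int) (hconfi : Int) (out : List (List Int)) : Prop := out = getCrossSupportIndex2_alt ilist hconfi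
instance (ilist : List Int) (hconfi : Int) (out : List (List Int)) : Decidable (Spec_getCrossSupportIndex2 ilist hconfi out) := by unfold Spec_getCrossSupportIndex2; infer_instance

-- ===== CLAIM (what is proved, stated in full; the proofs are below) =====
def Claim_equal_getCrossSupportIndex2 : Prop := ∀ (ilist : List Int) (hconfi : Int), Dom_getCrossSupportIndex2 ilist hconfi → Spec_getCrossSupportIndex2 ilist hconfi (getCrossSupportIndex2 ilist hconfi)

-- ===== LEMMAS AND PROOFS =====

-- Once x is in the accumulator, A's inner membership branch never fires again.
theorem pv_inner_inv (x : Int) (g : Int → Int) :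
    ∀ (r : List Int) (acc : List Int), x ∈ acc →
      r.foldl (fun b j =>
        (if x ∈ b then b else b ++ [x]) ++ [g j]) acc = acc ++ r.map g := by
  intro r
  induction r with
  | nil => intro acc _; simp
  | cons a t ih =>
    intro acc hx
    simp only [List.foldl_cons, if_pos hx, List.map_cons]
    rw [ih (acc ++ [g a]) (by simp [hx])]
    simp

-- A's inner loop builds exactly the suffix ilist.drop k for row k.
theorem pv_inner_eq_drop (ilist : List Int) (k : Nat) (hk : k + 1 < ilist.length) :
    (PySem.List.pyRange ((k : Int) + 1) (ilist.length : Int) 1).foldl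
      (fun b j =>
        (if PySem.List.pyGetD ilist (k : Int) 0 ∈ b then b
         else b ++ [PySem.List.pyGetD ilist (k : Int) 0]) ++
        [PySem.List.pyGetD ilist j 0]) [] = ilist.drop k := by
  rw [PySem.List.pyRange_one_cons (by exact_mod_cast hk)]
  simp only [List.foldl_cons, if_neg (List.not_mem_nil), List.nil_append]
  rw [pv_inner_inv _ _ _ _ (by simp)]
  have h1 : ((k : Int) + 1) + 1 = ((k + 2 : Nat) : Int) := by push_cast; ring
  rw [h1, PySem.List.map_pyGetD_pyRange' ilist 0 (by positivity)]
  have hgk : PySem.List.pyGetD ilist (k : Int) 0 = ilist[k]'(by omega) := by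
    rw [PySem.List.pyGetD_natCast]; simp [List.getD_eq_getElem?_getD, List.getElem?_eq_getElem (by omega : k < ilist.length)]
  have hgk1 : PySem.List.pyGetD ilist ((k : Int) + 1) 0 = ilist[k+1]'(by omega) := by
    have : (k : Int) + 1 = ((k + 1 : Nat) : Int) := by push_cast; ring
    rw [this, PySem.List.pyGetD_natCast]
    simp [List.getD_eq_getElem?_getD, List.getElem?_eq_getElem (by omega : k + 1 < ilist.length)]
  rw [hgk, hgk1, Int.toNat_natCast,
      List.drop_eq_getElem_cons (by omega : k < ilist.length),
      List.drop_eq_getElem_cons (by omega : k + 1 < ilist.length)]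
  simp

-- A equals the list of suffixes of length ≥ 2, in order.
theorem pv_A_eq (ilist : List Int) (hconfi : Int) :
    getCrossSupportIndex2 ilist hconfi
      = (List.range (ilist.length - 1)).map (fun k => ilist.drop k) := by
  unfold getCrossSupportIndex2
  rw [PySem.List.foldl_append_singleton_eq_map]
  rcases Nat.eq_zero_or_pos ilist.length with h | h
  · rw [PySem.List.pyRange_one_eq_nil (by simp [h] : ((ilist.length : Int) - 1) ≤ 0)]
    simp [h]
  · have hc : ((ilist.length : Int) - 1) = ((ilist.length - 1 : Nat) : Int) := by omega
    rw [hc, PySem.List.pyRange_zero_natCast, List.map_map, List.nil_append]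
    apply List.map_congr_left
    intro k hk
    simp only [List.mem_range] at hk
    simp only [Function.comp]
    exact pv_inner_eq_drop ilist k (by omega)

-- B's backward loop invariant: after processing indices n-1 … m the tail is
-- ilist.drop m and out holds the rows for those indices, newest first.
theorem pv_B_inv (ilist : List Int) (out0 : List (List Int)) :
    ∀ (c m : Nat), m + c = ilist.length → 1 ≤ m →
      ((PySem.List.pyRange (m : Int) (ilist.length : Int) 1).reverse).foldl
        (fun (st : List (List Int) × List Int) i =>
          let tail := PySem.List.pyGetD ilist i 0 :: st.2
          (st.1 ++ [PySem.List.pyGetD ilist (i - 1) 0 :: tail], tail)) (out0, ilist.drop (m + c))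
      = (out0 ++ ((List.range' m c).map (fun i => ilist.drop (i - 1))).reverse, ilist.drop m) := by
  intro c
  induction c with
  | zero =>
    intro m hm _
    rw [PySem.List.pyRange_one_eq_nil (by omega : (ilist.length : Int) ≤ (m : Int))]
    simp
  | succ c ih =>
    intro m hm h1
    rw [PySem.List.pyRange_one_cons (by omega : (m : Int) < (ilist.length : Int))]
    simp only [List.reverse_cons, List.foldl_append, List.foldl_cons, List.foldl_nil]
    have hcast : (m : Int) + 1 = ((m + 1 : Nat) : Int) := by push_cast; ring
    have harg : ilist.drop (m + (c + 1)) = ilist.drop ((m + 1) + c) := by ring_nf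
    rw [hcast, harg, ih (m + 1) (by omega) (by omega)]
    have hgm : PySem.List.pyGetD ilist (m : Int) 0 = ilist[m]'(by omega) := by
      rw [PySem.List.pyGetD_natCast]
      simp [List.getD_eq_getElem?_getD, List.getElem?_eq_getElem (by omega : m < ilist.length)]
    have hgm1 : PySem.List.pyGetD ilist ((m : Int) - 1) 0 = ilist[m - 1]'(by omega) := by
      have : (m : Int) - 1 = ((m - 1 : Nat) : Int) := by omega
      rw [this, PySem.List.pyGetD_natCast]
      simp [List.getD_eq_getElem?_getD, List.getElem?_eq_getElem (by omega : m - 1 < ilist.length)]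
    have hdm : (PySem.List.pyGetD ilist (m : Int) 0) :: ilist.drop (m + 1) = ilist.drop m := by
      rw [hgm, List.drop_eq_getElem_cons (by omega : m < ilist.length)]
    have hdm1 : (PySem.List.pyGetD ilist ((m : Int) - 1) 0) :: ilist.drop m = ilist.drop (m - 1) := by
      rw [hgm1, List.drop_eq_getElem_cons (by omega : m - 1 < ilist.length)]
      have h2 : m - 1 + 1 = m := by omega
      rw [h2]
    simp only [hdm, hdm1]
    rw [List.range'_succ]
    simp

-- B also equals the list of suffixes of length ≥ 2, in order.
theorem pv_B_eq (ilist : List Int) (hconfi : Int) :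
    getCrossSupportIndex2_alt ilist hconfi
      = (List.range (ilist.length - 1)).map (fun k => ilist.drop k) := by
  unfold getCrossSupportIndex2_alt
  rcases Nat.lt_or_ge ilist.length 2 with h | h
  · rw [PySem.List.pyRange_one_eq_nil (by exact_mod_cast Nat.le_of_lt_succ h : (ilist.length : Int) ≤ 1)]
    have h0 : ilist.length - 1 = 0 := by omega
    simp [h0]
  · have h0 : ilist.drop (1 + (ilist.length - 1)) = ([] : List Int) := by
      apply List.drop_eq_nil_of_le; omega
    have := pv_B_inv ilist [] (ilist.length - 1) 1 (by omega) (by omega)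
    rw [h0] at this
    simp only [Nat.cast_one] at this
    rw [this]
    simp only [List.nil_append, List.reverse_reverse]
    rw [List.range'_eq_map_range, List.map_map]
    apply List.map_congr_left
    intro k _
    simp [Function.comp]

-- ===== VERDICT (by name: the statement is the Claim_ definition above) =====
theorem getCrossSupportIndex2_spec : Claim_equal_getCrossSupportIndex2 := by
  intro ilist hconfi _
  unfold Spec_getCrossSupportIndex2
  rw [pv_A_eq, pv_B_eq]
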